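-- pv_equiv track=rewrite | github.com/Finnng1104/ICPC | docs/0.Coban/3. Thuật toán xử lý hình ảnh/Tree Game Grid Icpc.py | grundy
-- ===== SOURCE A (Python) =====
-- def grundy(n):
--     """
--     Tính Grundy Number cho trạng thái n
--
--     Tham số:
--     - n: trạng thái hiện tại
--
--     Trả về: Grundy Number
--     """
--     # Trạng thái 0 là thua
--     if n == 0:
--         return 0
--
--     # Tập các Grundy Number có thể đạt được
--     s = set()
--     for x in range(1, n+1):
--         s.add(grundy(n - x))
--
--     # Tìm MEX (Minimum EXcluded)
--     g = 0
--     while g in s: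
--         g += 1
--
--     return g
-- ===== SOURCE B (Python) =====
-- def grundy(n):
--     """Grundy number of state n: closed form grundy(n) = n (mex of {0,...,n-1}); 0 for states with no moves."""
--     return n if n > 0 else 0
-- ===== Notes on version B (the rewrite author's own statement) =====
-- stated objective: faster
-- what changed: Replaced the exponential recursive mex computation by the closed form grundy(n) = max(n, 0), proved by induction (the set of Grundy values reachable from n is exactly {0,...,n-1}, whose mex is n); intended as faster: a timing run found A timing out already on small states where B returns instantly, so no ratio was measurable.
import Mathlib
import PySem

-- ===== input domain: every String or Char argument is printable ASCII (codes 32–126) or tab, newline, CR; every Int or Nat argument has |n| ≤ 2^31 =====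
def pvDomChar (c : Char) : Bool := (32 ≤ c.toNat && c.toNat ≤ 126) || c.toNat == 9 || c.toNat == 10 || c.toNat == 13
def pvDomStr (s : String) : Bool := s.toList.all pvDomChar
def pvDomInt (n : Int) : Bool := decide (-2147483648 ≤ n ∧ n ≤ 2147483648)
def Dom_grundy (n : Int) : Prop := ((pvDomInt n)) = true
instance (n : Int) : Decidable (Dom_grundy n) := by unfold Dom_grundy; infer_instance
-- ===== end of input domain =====

-- B replaces A's exponential recursive mex by the closed form grundy(n) = max(n, 0).

-- ===== PORT A =====
-- 'g = 0; while g in s: g += 1' — fuel bounds the while loop for totality only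
def grundyMexWhile (s : PySem.Set Int) (g : Int) : Nat → Int
  | 0 => g
  | fuel + 1 => if g ∈ s then grundyMexWhile s (g + 1) fuel else g

-- A's recursion, fueled for totality; grundy supplies sufficient fuel
def grundyA (fuel : Nat) (n : Int) : Int :=
  match fuel with
  | 0 => 0
  | fuel + 1 =>
    if n = 0 then 0
    else
      let s : PySem.Set Int :=
        (PySem.List.pyRange 1 (n + 1) 1).foldl
          (fun s x => PySem.Set.add s (grundyA fuel (n - x))) PySem.Set.empty
      grundyMexWhile s 0 (n.toNat + 1)

def grundy (n : Int) : Int := grundyA (n.toNat + 1) n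

-- ===== PORT B =====
def grundy_alt (n : Int) : Int := if 0 < n then n else 0

-- ===== PRECONDITION & SPEC =====
-- Pre_ excludes only the large states on which A's depth-n recursion exceeds CPython's
-- default recursion limit and raises RecursionError, or, just below that threshold (which
-- shifts with the caller's frame depth, hence the margin), never finishes; B returns n there.
def Pre_grundy (n : Int) : Prop := n ≤ 900
instance (n : Int) : Decidable (Pre_grundy n) := by unfold Pre_grundy; infer_instance
def pvWitness_grundy : Int := (5)

def Spec_grundy (n : Int) (out : Int) : Prop := out = grundy_alt n
instance (n : Int) (out : Int) : Decidable (Spec_grundy n out) := by unfold Spec_grundy; infer_instance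

-- ===== CLAIM (what is proved, stated in full; the proofs are below) =====
def Claim_equal_grundy : Prop := ∀ (n : Int), Dom_grundy n → Pre_grundy n → Spec_grundy n (grundy n)

-- ===== LEMMAS AND PROOFS =====

-- the mex loop over a set whose members are exactly {0,…,n-1} stops at n
lemma grundyMexWhile_eq (s : PySem.Set Int) (n : Int)
    (hs : ∀ y, y ∈ s ↔ 0 ≤ y ∧ y < n) :
    ∀ (fuel : Nat) (g : Int), 0 ≤ g → g ≤ n → (n - g).toNat < fuel →
      grundyMexWhile s g fuel = n := by
  intro fuel
  induction fuel with
  | zero => intro g _ _ h; omega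
  | succ f ih =>
    intro g hg0 hgn hf
    by_cases hmem : g ∈ s
    · have hlt : g < n := ((hs g).mp hmem).2
      simp only [grundyMexWhile, if_pos hmem]
      exact ih (g + 1) (by omega) (by omega) (by omega)
    · have : ¬ g < n := fun hlt => hmem ((hs g).mpr ⟨hg0, hlt⟩)
      have hge : g = n := by omega
      subst hge
      simp only [grundyMexWhile, if_neg hmem]

lemma grundyA_closed : ∀ (fuel : Nat) (n : Int), n.toNat < fuel →
    grundyA fuel n = if 0 < n then n else 0 := by
  intro fuel
  induction fuel with
  | zero => intro n h; omega
  | succ f ih =>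
    intro n hfuel
    by_cases h0 : n = 0
    · simp [grundyA, h0]
    · by_cases hpos : 0 < n
      · -- the set built by the loop has members exactly {0,…,n-1}
        have hmem : ∀ y : Int,
            (y ∈ (PySem.List.pyRange 1 (n + 1) 1).foldl
              (fun s x => PySem.Set.add s (grundyA f (n - x))) PySem.Set.empty)
            ↔ 0 ≤ y ∧ y < n := by
          intro y
          rw [PySem.Set.mem_foldl_add]
          constructor
          · rintro (h | ⟨x, hx, rfl⟩)
            · simp [PySem.Set.empty] at h
            · rw [PySem.List.mem_pyRange_one] at hx
              have hrec : grundyA f (n - x) = if 0 < n - x then n - x else 0 :=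
                ih (n - x) (by omega)
              rw [hrec]; split_ifs <;> omega
          · rintro ⟨hy0, hyn⟩
            right
            refine ⟨n - y, ?_, ?_⟩
            · rw [PySem.List.mem_pyRange_one]; omega
            · have : n - (n - y) = y := by omega
              rw [ih (n - (n - y)) (by omega), this]
              split_ifs <;> omega
        simp only [grundyA, if_neg h0]
        rw [grundyMexWhile_eq _ n hmem (n.toNat + 1) 0 le_rfl (by omega) (by omega)]
        simp [hpos]
      · -- n < 0: the range is empty, the set is empty, mex is 0
        have hneg : n < 0 := by omega
        have htoNat : n.toNat = 0 := by omega
        have hrange : PySem.List.pyRange 1 (n + 1) 1 = [] := by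
          rw [PySem.List.pyRange_one, show (n + 1 - 1).toNat = 0 by omega]
          simp
        simp only [grundyA, if_neg h0, hrange, List.foldl_nil, htoNat]
        simp [grundyMexWhile, PySem.Set.empty, hpos]

-- ===== VERDICT (by name: the statement is the Claim_ definition above) =====
theorem grundy_spec : Claim_equal_grundy := by
  intro n _ _
  unfold Spec_grundy grundy grundy_alt
  exact grundyA_closed (n.toNat + 1) n (by omega)
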